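-- pv_equiv track=rewrite | github.com/kkxxh/algorithm.py | junnkk/programmers/level1/60_푸드파이트대회.py | solution
-- ===== SOURCE A (Python) =====
-- def solution(food):
--     result = ''
--     for i in range(1, len(food)):
--         result += str(i)*(food[i]//2)
--
--     result += '0'
--     for i in range(len(food)-1, 0, -1):
--         result += str(i)*(food[i]//2)
--
--     return result
-- ===== SOURCE B (Python) =====
-- def solution(food):
--     parts = ['0']
--     for i in range(len(food) - 1, 0, -1):
--         block = str(i) * (food[i] // 2)
--         parts = [block] + parts + [block]
--     return ''.join(parts)
-- ===== Notes on version B (the rewrite author's own statement) =====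
-- stated objective: alternative
-- what changed: Builds the palindrome inside-out with a single backward loop that wraps the accumulator on both sides with each block, instead of A's two mirror-image passes appending forward blocks, '0', then backward blocks.
import Mathlib
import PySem

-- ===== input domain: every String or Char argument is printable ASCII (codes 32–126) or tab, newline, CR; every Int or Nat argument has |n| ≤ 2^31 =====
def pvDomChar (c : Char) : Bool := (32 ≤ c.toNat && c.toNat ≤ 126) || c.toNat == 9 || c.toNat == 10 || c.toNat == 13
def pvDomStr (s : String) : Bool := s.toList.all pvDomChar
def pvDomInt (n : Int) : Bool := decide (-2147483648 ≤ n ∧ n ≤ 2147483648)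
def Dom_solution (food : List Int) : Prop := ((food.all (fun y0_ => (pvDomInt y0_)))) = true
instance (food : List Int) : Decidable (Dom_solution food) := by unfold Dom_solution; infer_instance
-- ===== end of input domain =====

-- B builds the palindrome inside-out: one backward loop wrapping a list of parts with each
-- block on both sides, then joins once, instead of A's two mirror-image appending passes
-- (objective: alternative).

-- str(i) * cnt  (Python string repetition: negative cnt gives ''), over List Char
def pvRep (i : Int) (cnt : Int) : List Char :=
  (List.replicate cnt.toNat (PySem.Int.toStr i).toList).flatten

-- ===== PORT A =====
def solution (food : List Int) : String :=
  let n : Int := PySem.List.len food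
  let r1 : List Char := (PySem.List.pyRange 1 n 1).foldl
    (fun acc i => acc ++ pvRep i (PySem.Int.floordiv (PySem.List.pyGetD food i 0) 2)) []
  let r2 : List Char := r1 ++ ['0']
  let r3 : List Char := (PySem.List.pyRange (n - 1) 0 (-1)).foldl
    (fun acc i => acc ++ pvRep i (PySem.Int.floordiv (PySem.List.pyGetD food i 0) 2)) r2
  String.ofList r3

-- ===== PORT B =====
def solution_alt (food : List Int) : String :=
  let n : Int := PySem.List.len food
  let parts : List (List Char) := (PySem.List.pyRange (n - 1) 0 (-1)).foldl
    (fun acc i =>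
      let b := pvRep i (PySem.Int.floordiv (PySem.List.pyGetD food i 0) 2)
      [b] ++ acc ++ [b]) [['0']]
  String.ofList parts.flatten

-- ===== PRECONDITION & SPEC =====
def Spec_solution (food : List Int) (out : String) : Prop := out = solution_alt food
instance (food : List Int) (out : String) : Decidable (Spec_solution food out) := by unfold Spec_solution; infer_instance

-- ===== CLAIM (what is proved, stated in full; the proofs are below) =====
def Claim_equal_solution : Prop := ∀ (food : List Int), Dom_solution food → Spec_solution food (solution food)

-- ===== LEMMAS AND PROOFS =====

-- wrapping fold characterised: fold of (b i ++ acc ++ b i) over l = blocks of l.reverse ++ c ++ blocks of l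
theorem pvWrapFold {α : Type} (b : Int → List α) (l : List Int) (c : List α) :
    l.foldl (fun acc i => b i ++ acc ++ b i) c
      = (l.reverse.map b).flatten ++ c ++ (l.map b).flatten := by
  induction l generalizing c with
  | nil => simp
  | cons x xs ih =>
    rw [List.foldl_cons, ih]
    simp [List.append_assoc]

theorem pvFlattenSingleton {α β : Type} (f : α → List β) (l : List α) :
    (l.map (fun i => ([f i] : List (List β)))).flatten = l.map f := by
  induction l with
  | nil => rfl
  | cons x xs ih => simp [ih]

theorem pvSolution_eq (food : List Int) : solution food = solution_alt food := by
  unfold solution solution_alt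
  have hrev : PySem.List.pyRange ((PySem.List.len food) - 1) 0 (-1)
      = (PySem.List.pyRange 1 (PySem.List.len food) 1).reverse := by
    have := PySem.List.pyRange_neg_one_eq_reverse ((PySem.List.len food) - 1) 0
    simpa using this
  simp only [hrev]
  refine congrArg String.ofList ?_
  rw [pvWrapFold]
  simp only [PySem.List.foldl_append_eq_flatMap, List.reverse_reverse]
  simp [List.flatMap_def, List.flatten_append, List.append_assoc, pvFlattenSingleton,
    ← List.map_reverse]

-- ===== VERDICT (by name: the statement is the Claim_ definition above) =====
theorem solution_spec : Claim_equal_solution := by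
  intro food _
  unfold Spec_solution
  exact pvSolution_eq food
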